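-- pv_equiv track=rewrite | github.com/daedalus/rfc-editor | src/rfc_editor/__init__.py | _extract_copyright
-- ===== SOURCE A (Python) =====
-- def _extract_copyright(lines: list[str]) -> str:
--     """Extract the Copyright notice."""
--     content = []
--     in_copyright = False
--
--     for line in lines:
--         line_stripped = line.strip()
--         if line_stripped.startswith("Copyright"):
--             in_copyright = True
--
--         if in_copyright:
--             content.append(line_stripped)
--             if not line and content:
--                 break
--             if (
--                 not line_stripped.startswith("Copyright")
--                 and line_stripped
--             ):
--                 break
--
--     return "\n".join(content).strip()
-- ===== SOURCE B (Python) =====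
-- def _extract_copyright(lines: list[str]) -> str:
--     """Extract the Copyright notice by computing the block's boundary indices and slicing."""
--     strips = [line.strip() for line in lines]
--     start = next((i for i, s in enumerate(strips) if s.startswith("Copyright")), None)
--     if start is None:
--         return ""
--     n = len(lines)
--     stop = next((i for i in range(start, n)
--                  if not lines[i]
--                  or (strips[i] and not strips[i].startswith("Copyright"))),
--                 n - 1)
--     return "\n".join(strips[start:stop + 1]).strip()
-- ===== Notes on version B (the rewrite author's own statement) =====
-- stated objective: alternative
-- what changed: Replaced A's flag-driven accumulate-and-break loop by an index/slice formulation: B strips all lines once, computes the block's two boundary indices (first 'Copyright'-prefixed line; first blank or non-'Copyright' stripped line at or after it, defaulting to the last line) with next() over generators, and returns the join of the slice between them.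
import Mathlib
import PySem

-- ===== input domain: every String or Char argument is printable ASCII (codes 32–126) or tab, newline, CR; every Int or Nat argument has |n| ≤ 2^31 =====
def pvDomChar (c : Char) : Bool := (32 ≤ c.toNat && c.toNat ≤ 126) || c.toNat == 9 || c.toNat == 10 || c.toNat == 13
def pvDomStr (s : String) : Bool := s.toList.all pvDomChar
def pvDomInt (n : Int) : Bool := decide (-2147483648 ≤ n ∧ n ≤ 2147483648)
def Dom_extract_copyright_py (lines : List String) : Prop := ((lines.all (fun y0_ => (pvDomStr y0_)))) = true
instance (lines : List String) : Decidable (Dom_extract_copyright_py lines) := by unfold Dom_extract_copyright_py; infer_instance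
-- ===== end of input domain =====

-- B replaces A's flag-driven accumulate-with-break loop by computing the block's two
-- boundary indices (first "Copyright" line; first terminating line) and slicing; same cost.

-- ===== PORT A =====
-- A's single flag-driven loop with break, as structural recursion over (content, in_copyright).
def extractA_loop : List String → List String → Bool → List String
  | [], content, _ => content
  | line :: rest, content, inc =>
    let ls := PySem.Str.strip line
    let inc' := if PySem.Str.startswith ls "Copyright" then true else inc
    if inc' then
      let content' := content ++ [ls]
      if line = "" ∧ content' ≠ [] then content'
      else if ¬ PySem.Str.startswith ls "Copyright" ∧ ls ≠ "" then content'
      else extractA_loop rest content' inc'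
    else extractA_loop rest content inc'

def extract_copyright_py (lines : List String) : String :=
  PySem.Str.strip (PySem.Str.join "\n" (extractA_loop lines [] false))

-- ===== PORT B =====
-- B's second boundary: next(i for i in range(start, n) if not lines[i] or (strips[i] and
-- not strips[i].startswith("Copyright"))); indices stay in range, so getD is exact.
def findStopB (lines strips : List String) (n : Nat) (i : Nat) : Option Nat :=
  if i < n then
    if lines.getD i "" = "" ∨ (strips.getD i "" ≠ "" ∧ ¬ PySem.Str.startswith (strips.getD i "") "Copyright")
    then some i
    else findStopB lines strips n (i + 1)
  else none
termination_by n - i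

def extract_copyright_py_alt (lines : List String) : String :=
  match List.findIdx? (fun s => PySem.Str.startswith s "Copyright") (lines.map PySem.Str.strip) with
  | none => ""
  | some start =>
    -- strips[start:stop+1] with 0 ≤ start ≤ stop+1 ≤ n is exactly drop-then-take
    PySem.Str.strip (PySem.Str.join "\n"
      (((lines.map PySem.Str.strip).drop start).take
        ((findStopB lines (lines.map PySem.Str.strip) lines.length start).getD
          (lines.length - 1) + 1 - start)))

-- ===== PRECONDITION & SPEC =====
def Spec_extract_copyright_py (lines : List String) (out : String) : Prop := out = extract_copyright_py_alt lines
instance (lines : List String) (out : String) : Decidable (Spec_extract_copyright_py lines out) := by unfold Spec_extract_copyright_py; infer_instance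

-- ===== CLAIM (what is proved, stated in full; the proofs are below) =====
def Claim_equal_extract_copyright_py : Prop := ∀ (lines : List String), Dom_extract_copyright_py lines → Spec_extract_copyright_py lines (extract_copyright_py lines)

-- ===== LEMMAS AND PROOFS =====

-- Proof-side description of the block collected once A's flag is set: stripped lines
-- up to and including the first terminating line.
def takeInclA : List String → List String
  | [] => []
  | line :: rest =>
    let ls := PySem.Str.strip line
    if line = "" ∨ (ls ≠ "" ∧ ¬ PySem.Str.startswith ls "Copyright") then [ls]
    else ls :: takeInclA rest

lemma loopA_true_eq_takeIncl (xs : List String) :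
    ∀ acc, extractA_loop xs acc true = acc ++ takeInclA xs := by
  induction xs with
  | nil => intro acc; simp [extractA_loop, takeInclA]
  | cons line rest ih =>
      intro acc
      simp only [extractA_loop, takeInclA, ite_self]
      rw [if_pos trivial]
      by_cases h0 : line = ""
      · rw [if_pos ⟨h0, by simp⟩, if_pos (Or.inl h0)]
      · rw [if_neg (fun hc => h0 hc.1)]
        by_cases h2 : PySem.Str.startswith (PySem.Str.strip line) "Copyright" = true
        · rw [if_neg (fun hc => hc.1 h2),
            if_neg (by intro hc; rcases hc with h | ⟨_, hns⟩; exacts [h0 h, hns h2])]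
          rw [ih]; simp
        · by_cases h3 : PySem.Str.strip line = ""
          · rw [if_neg (fun hc => hc.2 h3),
              if_neg (by intro hc; rcases hc with h | ⟨hne, _⟩; exacts [h0 h, hne h3])]
            rw [ih]; simp
          · rw [if_pos ⟨h2, h3⟩, if_pos (Or.inr ⟨h3, fun hb => h2 hb⟩)]

lemma findStopB_ge (lines strips : List String) (n : Nat) :
    ∀ k i j, n - i ≤ k → findStopB lines strips n i = some j → i ≤ j := by
  intro k
  induction k with
  | zero =>
      intro i j hk h
      unfold findStopB at h
      rw [if_neg (by omega)] at h
      cases h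
  | succ k ih =>
      intro i j hk h
      unfold findStopB at h
      by_cases h1 : i < n
      · rw [if_pos h1] at h
        split_ifs at h with h2
        · cases h; exact Nat.le_refl _
        · have := ih (i + 1) j (by omega) h; omega
      · rw [if_neg h1] at h; cases h

lemma mapDropComm (f : String → String) : ∀ (l : List String) (i : Nat), (l.map f).drop i = (l.drop i).map f := by
  intro l
  induction l with
  | nil => intro i; simp
  | cons a l ih =>
      intro i
      cases i with
      | zero => simp
      | succ j => simp only [List.map_cons, List.drop_succ_cons]; exact ih j

-- B's slice equals takeInclA of the suffix, for every start index.
lemma slice_eq_takeIncl (lines : List String) :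
    ∀ k i, lines.length - i ≤ k → i ≤ lines.length →
      ((lines.map PySem.Str.strip).drop i).take
        ((findStopB lines (lines.map PySem.Str.strip) lines.length i).getD (lines.length - 1) + 1 - i)
      = takeInclA (lines.drop i) := by
  intro k
  induction k with
  | zero =>
      intro i hk hi
      have hie : i = lines.length := by omega
      rw [List.drop_eq_nil_of_le (by simp [hie]), List.drop_eq_nil_of_le (by simp [hie])]
      simp [takeInclA]
  | succ k ih =>
      intro i hk hi
      by_cases h1 : i < lines.length
      · have hyd : lines.drop i = lines[i] :: lines.drop (i + 1) :=
          List.drop_eq_getElem_cons h1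
        have hsd : (lines.map PySem.Str.strip).drop i
            = PySem.Str.strip lines[i] :: (lines.map PySem.Str.strip).drop (i + 1) := by
          rw [mapDropComm, mapDropComm, hyd, List.map_cons]
        have hgl : lines.getD i "" = lines[i] := by
          simp [List.getD_eq_getElem?_getD, List.getElem?_eq_getElem h1]
        have hgs : (lines.map PySem.Str.strip).getD i "" = PySem.Str.strip lines[i] := by
          have h1' : i < (lines.map PySem.Str.strip).length := by simpa using h1
          simp [List.getD_eq_getElem?_getD, List.getElem?_eq_getElem h1']
        unfold findStopB
        rw [if_pos h1, hgl, hgs]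
        by_cases hc : lines[i] = "" ∨ (PySem.Str.strip lines[i] ≠ "" ∧
            ¬ PySem.Str.startswith (PySem.Str.strip lines[i]) "Copyright")
        · rw [if_pos hc]
          rw [hsd, hyd]
          have : i + 1 - i = 1 := by omega
          rw [Option.getD_some, this]
          rw [takeInclA]
          rw [if_pos hc]
          rfl
        · rw [if_neg hc]
          have hstop : i ≤ (findStopB lines (lines.map PySem.Str.strip) lines.length (i + 1)).getD
              (lines.length - 1) := by
            cases hf : findStopB lines (lines.map PySem.Str.strip) lines.length (i + 1) with
            | none => simp; omega
            | some j =>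
                have := findStopB_ge lines (lines.map PySem.Str.strip) lines.length
                  (lines.length) (i + 1) j (by omega) hf
                simp; omega
          set stop := (findStopB lines (lines.map PySem.Str.strip) lines.length (i + 1)).getD
              (lines.length - 1) with hstopdef
          have harith : stop + 1 - i = (stop + 1 - (i + 1)) + 1 := by omega
          rw [hsd, harith, List.take_succ_cons, hyd, takeInclA, if_neg hc]
          rw [ih (i + 1) (by omega) (by omega)]
      · have hie : i = lines.length := by omega
        rw [List.drop_eq_nil_of_le (by simp [hie]), List.drop_eq_nil_of_le (by simp [hie])]
        simp [takeInclA]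

lemma loopA_false_eq_find (lines : List String) :
    extractA_loop lines [] false =
      (match List.findIdx? (fun s => PySem.Str.startswith s "Copyright") (lines.map PySem.Str.strip) with
       | none => []
       | some start => takeInclA (lines.drop start)) := by
  induction lines with
  | nil => rfl
  | cons line rest ih =>
      rw [List.map_cons, List.findIdx?_cons]
      by_cases h : PySem.Str.startswith (PySem.Str.strip line) "Copyright" = true
      · have hline : line ≠ "" := by
          intro he; subst he; exact absurd h (by decide)
        rw [if_pos h]
        simp only [List.drop_zero]
        rw [extractA_loop]
        simp only [h, if_pos trivial]
        rw [if_neg (fun hc => hline hc.1), if_neg (by simp), loopA_true_eq_takeIncl]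
        rw [takeInclA, if_neg (by intro hc; rcases hc with h0 | ⟨_, hns⟩; exacts [hline h0, hns h])]
        rfl
      · have hb : PySem.Str.startswith (PySem.Str.strip line) "Copyright" = false := by
          simpa using h
        rw [extractA_loop]
        simp only [hb, Bool.false_eq_true, if_false]
        rw [ih]
        cases List.findIdx? (fun s => PySem.Str.startswith s "Copyright") (rest.map PySem.Str.strip) with
        | none => rfl
        | some k => simp [List.drop_succ_cons]

lemma altB_eq (lines : List String) :
    extract_copyright_py_alt lines =
      (match List.findIdx? (fun s => PySem.Str.startswith s "Copyright") (lines.map PySem.Str.strip) with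
       | none => ""
       | some start => PySem.Str.strip (PySem.Str.join "\n" (takeInclA (lines.drop start)))) := by
  unfold extract_copyright_py_alt
  cases hf : List.findIdx? (fun s => PySem.Str.startswith s "Copyright") (lines.map PySem.Str.strip) with
  | none => simp only [hf]
  | some start =>
      have hlt : start < lines.length := by
        have := List.findIdx?_eq_some_iff_findIdx_eq.mp hf
        simpa using this.1
      simp only [hf]
      rw [slice_eq_takeIncl lines lines.length start (by omega) (le_of_lt hlt)]

-- ===== VERDICT (by name: the statement is the Claim_ definition above) =====
theorem extract_copyright_py_spec : Claim_equal_extract_copyright_py := by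
  intro lines _
  unfold Spec_extract_copyright_py extract_copyright_py
  rw [altB_eq, loopA_false_eq_find]
  cases hf : List.findIdx? (fun s => PySem.Str.startswith s "Copyright") (lines.map PySem.Str.strip) with
  | none => simp only [hf]; decide
  | some start => simp only [hf]
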